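-- pv_equiv track=rewrite | github.com/Br1d3e/veriwrite | replayer/modules/stats/doc/test/doc_stats_test.py | word_bigram
-- ===== SOURCE A (Python) =====
-- def word_bigram(text: str) -> set[str]:
--     # preprocess text
--     punc = set("\n\r,.?!@#$%^&*;:()[]{}\"'/-+~\\<>")
--     text = text.lower()
--     for i in range(len(text)):
--         if text[i] in punc:
--             text = text[:i] + " " + text[i + 1 : ] if i < len(text) else text[:i] + " "
--
--     text_list = text.split()
--     n = len(text_list)
--     bigram = []
--     for j in range(0, n - 1):
--         bigram.append(text_list[j] + " " + text_list[j + 1])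
--     return set(bigram)
-- ===== SOURCE B (Python) =====
-- def word_bigram(text: str) -> set[str]:
--     # single left-to-right scan: maintain current word buffer and previous word,
--     # emit each bigram into the set as soon as a word completes
--     punc = set("\n\r,.?!@#$%^&*;:()[]{}\"'/-+~\\<>")
--     result = set()
--     prev = None
--     buf = ""
--     for c in text.lower():
--         if c.isspace() or c in punc:
--             if buf:
--                 if prev is not None:
--                     result.add(prev + " " + buf)
--                 prev = buf
--                 buf = ""
--         else:
--             buf += c
--     if buf and prev is not None:
--         result.add(prev + " " + buf)
--     return result
-- ===== Notes on version B (the rewrite author's own statement) =====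
-- stated objective: alternative
-- what changed: Replaces A's three-phase pipeline (rebuild the string once per punctuation character via slicing, then split into a token list, then pair tokens by index) with a single left-to-right scan that keeps a current-word buffer and the previous word and adds each bigram to the set as soon as a word completes, building no intermediate string, token list or bigram list.
import Mathlib
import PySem

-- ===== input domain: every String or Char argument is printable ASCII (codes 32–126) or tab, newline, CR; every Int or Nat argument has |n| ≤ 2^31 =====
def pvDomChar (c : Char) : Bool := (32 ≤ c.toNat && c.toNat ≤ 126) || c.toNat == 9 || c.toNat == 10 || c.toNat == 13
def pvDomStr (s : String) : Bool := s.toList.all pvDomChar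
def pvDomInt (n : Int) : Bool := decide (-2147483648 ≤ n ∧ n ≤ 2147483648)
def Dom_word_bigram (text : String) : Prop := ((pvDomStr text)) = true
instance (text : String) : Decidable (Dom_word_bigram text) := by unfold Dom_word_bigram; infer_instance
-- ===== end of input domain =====

-- B replaces A's pipeline (rebuild the string per punctuation character, split into a token
-- list, pair tokens by index) with one left-to-right scan keeping a word buffer and the
-- previous word, adding each bigram to the set as a word completes (objective: alternative).

-- the punctuation set both Pythons build from the same literal
def pvPunc : PySem.Set Char := PySem.Set.ofList "\n\r,.?!@#$%^&*;:()[]{}\"'/-+~\\<>".toList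

-- a + " " + b  on strings
def pvCat (a b : String) : String := String.ofList (a.toList ++ ' ' :: b.toList)

-- ===== PORT A =====
-- body of A's replacement loop: text = text[:i] + " " + text[i+1:] if text[i] in punc
def pvStepA (t : List Char) (i : Int) : List Char :=
  if pvPunc.contains (PySem.List.pyGetD t i ' ') then
    if i < (t.length : Int) then
      PySem.List.slice t none (some i) ++ ' ' :: PySem.List.slice t (some (i + 1)) none
    else
      PySem.List.slice t none (some i) ++ [' ']
  else t

def word_bigram (text : String) : List String :=
  let t0 : List Char := PySem.Chars.lower text.toList
  let t1 : List Char := (PySem.List.pyRange 0 (t0.length : Int) 1).foldl pvStepA t0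
  let textList : List String := (PySem.Chars.split₀ t1).map String.ofList
  let n : Int := textList.length
  let bigram : List String :=
    (PySem.List.pyRange 0 (n - 1) 1).foldl
      (fun acc j =>
        acc ++ [pvCat (PySem.List.pyGetD textList j "") (PySem.List.pyGetD textList (j + 1) "")]) []
  PySem.Set.ofList bigram

-- ===== PORT B =====
-- one step of B's scan; state = (previous word, current word buffer, bigram set)
def pvStepB (st : Option (List Char) × List Char × PySem.Set String) (c : Char) :
    Option (List Char) × List Char × PySem.Set String :=
  match st with
  | (prev, buf, acc) =>
    if PySem.Chars.isspace c || pvPunc.contains c then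
      if buf.isEmpty then (prev, buf, acc)
      else
        match prev with
        | some p => (some buf, [], acc.add (String.ofList (p ++ ' ' :: buf)))
        | none => (some buf, [], acc)
    else (prev, buf ++ [c], acc)

def word_bigram_alt (text : String) : List String :=
  match (PySem.Chars.lower text.toList).foldl pvStepB (none, [], PySem.Set.empty) with
  | (prev, buf, acc) =>
    if buf.isEmpty then acc
    else
      match prev with
      | some p => acc.add (String.ofList (p ++ ' ' :: buf))
      | none => acc

-- ===== PRECONDITION & SPEC =====
def Spec_word_bigram (text : String) (out : List String) : Prop := out = word_bigram_alt text
instance (text : String) (out : List String) : Decidable (Spec_word_bigram text out) := by unfold Spec_word_bigram; infer_instance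

-- ===== CLAIM (what is proved, stated in full; the proofs are below) =====
def Claim_equal_word_bigram : Prop := ∀ (text : String), Dom_word_bigram text → Spec_word_bigram text (word_bigram text)

-- ===== LEMMAS AND PROOFS =====

-- what A's replacement loop does to one character
def pvRepl (c : Char) : Char := if pvPunc.contains c then ' ' else c

-- the bigram list of a word list, adjacent pairs
def pvPairs : List String → List String
  | a :: b :: rest => pvCat a b :: pvPairs (b :: rest)
  | _ => []

-- B's trailing finalization (= the match at the end of word_bigram_alt)
def pvFinish (st : Option (List Char) × List Char × PySem.Set String) : PySem.Set String :=
  match st with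
  | (prev, buf, acc) =>
    if buf.isEmpty then acc
    else
      match prev with
      | some p => acc.add (String.ofList (p ++ ' ' :: buf))
      | none => acc

-- the set of bigrams of the reversed token stack
def pvS (rts : List (List Char)) : PySem.Set String :=
  PySem.Set.ofList (pvPairs (rts.reverse.map String.ofList))

lemma pvStepA_eq (t : List Char) (k : Nat) (hk : k < t.length) :
    pvStepA t (k : Int) = t.take k ++ pvRepl (t.getD k ' ') :: t.drop (k + 1) := by
  unfold pvStepA pvRepl
  rw [PySem.List.pyGetD_natCast]
  split_ifs with h1 h2
  · rw [PySem.List.slice_to t (by positivity), PySem.List.slice_from t (by positivity)]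
    norm_num
  · exfalso; exact h2 (by exact_mod_cast hk)
  · conv_lhs => rw [← List.take_append_drop k t]
    rw [List.drop_eq_getElem_cons hk, List.getD_eq_getElem t ' ' hk]

lemma pvSep_eq (c : Char) :
    PySem.Chars.isspace (pvRepl c) = (PySem.Chars.isspace c || pvPunc.contains c) := by
  unfold pvRepl
  by_cases h : c ∈ pvPunc
  · simp [PySem.Set.contains, h]
    decide
  · simp [PySem.Set.contains, h]

lemma pvLoopA (m k : Nat) (t : List Char) (ht : t.length = k + m) :
    (PySem.List.pyRange (k : Int) ((k + m : Nat) : Int) 1).foldl pvStepA t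
      = t.take k ++ (t.drop k).map pvRepl := by
  induction m generalizing k t with
  | zero =>
    have h0 : PySem.List.pyRange (k : Int) ((k + 0 : Nat) : Int) 1 = [] := by
      simp [PySem.List.pyRange]
    rw [h0]
    have h1 : t.take k = t := List.take_of_length_le (by omega)
    have h2 : t.drop k = [] := List.drop_eq_nil_of_le (by omega)
    simp [h1, h2]
  | succ m ih =>
    have hk : k < t.length := by omega
    rw [PySem.List.pyRange_one_cons (by push_cast; omega)]
    simp only [List.foldl_cons]
    rw [pvStepA_eq t k hk]
    have hlen : (t.take k ++ pvRepl (t.getD k ' ') :: t.drop (k + 1)).length = (k + 1) + m := by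
      simp [List.length_take]; omega
    have hcast : ((k : Int) + 1) = (((k + 1 : Nat)) : Int) := by push_cast; ring
    have hcast2 : (((k + (m + 1) : Nat)) : Int) = ((((k + 1) + m : Nat)) : Int) := by push_cast; ring
    rw [hcast, hcast2, ih (k + 1) _ hlen]
    have htk : (t.take k).length = k := by simp; omega
    rw [List.take_append, List.drop_append, htk,
        List.drop_eq_getElem_cons hk, List.getD_eq_getElem t ' ' hk]
    simp [List.take_take]
    have e0 : List.drop (k + 1) (List.take k (List.map pvRepl t)) = [] :=
      List.drop_eq_nil_of_le (by simp)
    rw [e0, List.nil_append]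
    conv_rhs => rw [List.drop_eq_getElem_cons (l := List.map pvRepl t) (by simpa using hk)]
    rw [List.getElem_map]

lemma pvPairs_append_pair (ys : List String) (a b : String) :
    pvPairs (ys ++ [a, b]) = pvPairs (ys ++ [a]) ++ [pvCat a b] := by
  induction ys with
  | nil => simp [pvPairs]
  | cons y ys ih =>
    cases ys with
    | nil => simp [pvPairs]
    | cons z zs => simpa [pvPairs] using ih

lemma pvPairs_length (l : List String) : (pvPairs l).length = l.length - 1 := by
  induction l with
  | nil => simp [pvPairs]
  | cons a l ih =>
    cases l with
    | nil => simp [pvPairs]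
    | cons b rest => simp [pvPairs] at ih ⊢; omega

lemma pvPairs_getElem (l : List String) (i : Nat) (h : i + 1 < l.length) :
    (pvPairs l)[i]'(by rw [pvPairs_length]; omega) = pvCat (l[i]'(by omega)) (l[i + 1]'h) := by
  induction l generalizing i with
  | nil => simp at h
  | cons a l ih =>
    cases l with
    | nil => simp at h
    | cons b rest =>
      cases i with
      | zero => simp [pvPairs]
      | succ j =>
        simp only [pvPairs]
        rw [List.getElem_cons_succ]
        exact ih j (by simpa using h)

lemma pvRange_zero_nat (N : Nat) :
    PySem.List.pyRange 0 (N : Int) 1 = (List.range N).map (fun k : Nat => (k : Int)) := by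
  unfold PySem.List.pyRange
  rcases Nat.eq_zero_or_pos N with h | h
  · subst h; simp
  · have h1 : (0 : Int) < (N : Int) := by exact_mod_cast h
    simp only [if_neg (by norm_num : ¬ (1:Int) = 0), if_pos (by norm_num : (0:Int) < 1), if_pos h1]
    have h2 : (((N : Int) - 0 + 1 - 1) / 1).toNat = N := by omega
    rw [h2]
    apply List.map_congr_left
    intro k hk
    omega

lemma pvBigram_eq (l : List String) :
    (PySem.List.pyRange 0 ((l.length : Int) - 1) 1).foldl
      (fun acc j => acc ++ [pvCat (PySem.List.pyGetD l j "") (PySem.List.pyGetD l (j + 1) "")]) []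
      = pvPairs l := by
  rw [PySem.List.foldl_append_singleton_eq_map
        (f := fun j => pvCat (PySem.List.pyGetD l j "") (PySem.List.pyGetD l (j + 1) "")),
      List.nil_append]
  rcases Nat.eq_zero_or_pos l.length with h | h
  · obtain rfl : l = [] := List.eq_nil_of_length_eq_zero h
    simp [PySem.List.pyRange, pvPairs]
  · have hc : (l.length : Int) - 1 = ((l.length - 1 : Nat) : Int) := by omega
    rw [hc, pvRange_zero_nat]
    apply List.ext_getElem
    · simp [pvPairs_length]
    · intro i h1 h2
      rw [List.getElem_map, List.getElem_map, List.getElem_range]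
      have hi : i + 1 < l.length := by simp at h1; omega
      rw [pvPairs_getElem l i hi]
      have c1 : ((i : Int) + 1) = ((i + 1 : Nat) : Int) := by push_cast; ring
      rw [c1, PySem.List.pyGetD_natCast, PySem.List.pyGetD_natCast,
          List.getD_eq_getElem l "" (by omega), List.getD_eq_getElem l "" hi]

lemma pvS_nil : pvS [] = [] := by simp [pvS, pvPairs, PySem.Set.ofList_nil]

lemma pvS_single (buf : List Char) : pvS [buf] = [] := by
  simp [pvS, pvPairs, PySem.Set.ofList_nil]

lemma pvS_cons (p : List Char) (rts' : List (List Char)) (buf : List Char) :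
    pvS (buf :: p :: rts')
      = (pvS (p :: rts')).add (String.ofList (p ++ ' ' :: buf)) := by
  unfold pvS
  have h1 : (buf :: p :: rts').reverse.map String.ofList
      = (rts'.reverse.map String.ofList) ++ [String.ofList p, String.ofList buf] := by
    simp
  have h2 : (p :: rts').reverse.map String.ofList
      = (rts'.reverse.map String.ofList) ++ [String.ofList p] := by
    simp
  rw [h1, h2, pvPairs_append_pair, PySem.Set.ofList_append_singleton]
  congr 1
  simp [pvCat]

lemma pvGo_nil (cur : List Char) (acc : List (List Char)) :
    PySem.Chars.split₀.go [] cur acc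
      = if cur.isEmpty then acc.reverse else (cur.reverse :: acc).reverse := by
  simp [PySem.Chars.split₀.go]

lemma pvGo_cons (c : Char) (rest cur : List Char) (acc : List (List Char)) :
    PySem.Chars.split₀.go (c :: rest) cur acc
      = if PySem.Chars.isspace c then
          (if cur.isEmpty then PySem.Chars.split₀.go rest [] acc
           else PySem.Chars.split₀.go rest [] (cur.reverse :: acc))
        else PySem.Chars.split₀.go rest (c :: cur) acc := by
  simp [PySem.Chars.split₀.go]

lemma pvMain (l : List Char) : ∀ (buf : List Char) (rts : List (List Char)),
    pvFinish (l.foldl pvStepB (rts.head?, buf, pvS rts))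
      = PySem.Set.ofList
          (pvPairs ((PySem.Chars.split₀.go (l.map pvRepl) buf.reverse rts).map String.ofList)) := by
  induction l with
  | nil =>
    intro buf rts
    rw [List.foldl_nil, List.map_nil, pvGo_nil]
    by_cases hbuf : buf = []
    · subst hbuf
      simp [pvFinish, pvS]
    · have hrev : buf.reverse.isEmpty = false := by simp [hbuf]
      have hne : buf.isEmpty = false := by simp [hbuf]
      rw [hrev, if_neg (by simp)]
      cases rts with
      | nil =>
        simp [pvFinish, hne, pvS_nil, pvPairs]
      | cons p rts' =>
        simp only [pvFinish, List.head?_cons, hne, Bool.false_eq_true, if_false,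
          List.reverse_reverse]
        rw [← pvS_cons]
        unfold pvS
        rfl
  | cons c l ih =>
    intro buf rts
    rw [List.foldl_cons, List.map_cons, pvGo_cons]
    by_cases hsep : (PySem.Chars.isspace c || pvPunc.contains c) = true
    · have hgo : PySem.Chars.isspace (pvRepl c) = true := by rw [pvSep_eq]; exact hsep
      rw [if_pos hgo]
      by_cases hbuf : buf = []
      · subst hbuf
        simp only [pvStepB, hsep, if_true, List.isEmpty_nil, List.reverse_nil]
        exact ih [] rts
      · have hne : buf.isEmpty = false := by simp [hbuf]
        have hrev : buf.reverse.isEmpty = false := by simp [hbuf]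
        simp only [pvStepB, hsep, if_true, hne, Bool.false_eq_true, if_false,
          hrev, List.reverse_reverse]
        cases rts with
        | nil =>
          simp only [List.head?_nil]
          rw [pvS_nil]
          have h1 := ih [] [buf]
          simp only [List.head?_cons, pvS_single, List.reverse_nil] at h1
          exact h1
        | cons p rts' =>
          simp only [List.head?_cons]
          have h1 := ih [] (buf :: p :: rts')
          simp only [List.head?_cons, List.reverse_nil] at h1
          rw [pvS_cons] at h1
          exact h1
    · have hor : PySem.Chars.isspace c = false ∧ pvPunc.contains c = false :=
        Bool.or_eq_false_iff.mp (Bool.eq_false_iff.mpr hsep)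
      have hgo : ¬ (PySem.Chars.isspace (pvRepl c) = true) := by
        rw [pvSep_eq]; exact hsep
      have hrc : pvRepl c = c := by unfold pvRepl; rw [hor.2]; simp
      rw [if_neg hgo, hrc]
      simp only [pvStepB, hsep, Bool.false_eq_true, if_false]
      have h1 := ih (buf ++ [c]) rts
      rw [List.reverse_append] at h1
      simpa using h1

lemma pvA_eq (text : String) :
    word_bigram text
      = PySem.Set.ofList
          (pvPairs ((PySem.Chars.split₀ ((PySem.Chars.lower text.toList).map pvRepl)).map String.ofList)) := by
  simp only [word_bigram]
  have hA : (PySem.List.pyRange 0 (((PySem.Chars.lower text.toList).length : Nat) : Int) 1).foldl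
        pvStepA (PySem.Chars.lower text.toList)
      = (PySem.Chars.lower text.toList).map pvRepl := by
    have h := pvLoopA (PySem.Chars.lower text.toList).length 0 (PySem.Chars.lower text.toList)
      (by omega)
    simpa using h
  rw [hA, pvBigram_eq]

lemma pvAlt_eq_finish (text : String) :
    word_bigram_alt text
      = pvFinish ((PySem.Chars.lower text.toList).foldl pvStepB (none, [], PySem.Set.empty)) := by
  unfold word_bigram_alt pvFinish
  rfl

lemma pvB_eq (text : String) :
    word_bigram_alt text
      = PySem.Set.ofList
          (pvPairs ((PySem.Chars.split₀ ((PySem.Chars.lower text.toList).map pvRepl)).map String.ofList)) := by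
  rw [pvAlt_eq_finish]
  have hB := pvMain (PySem.Chars.lower text.toList) [] []
  simp only [List.head?_nil, pvS_nil, List.reverse_nil] at hB
  exact hB

-- ===== VERDICT (by name: the statement is the Claim_ definition above) =====
theorem word_bigram_spec : Claim_equal_word_bigram := by
  intro text _h
  unfold Spec_word_bigram
  rw [pvA_eq, pvB_eq]
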